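-- pv_equiv track=rewrite | github.com/zongyuanmuzi-byte/RAG001 | rag_day1/services/retrieval.py | simple_rerank
-- ===== SOURCE A (Python) =====
-- def simple_rerank(query: str, candidates: list[str]):
--     query_terms = query.lower().split()
--
--     scored = []
--     for doc in candidates:
--         text_lower = doc.lower()
--         hit_count = sum(1 for term in query_terms if term in text_lower)
--         scored.append((doc, hit_count))
--
--     scored.sort(key=lambda x: x[1], reverse=True)
--     reranked_docs = [item[0] for item in scored]
--
--     return reranked_docs
-- ===== SOURCE B (Python) =====
-- def simple_rerank(query: str, candidates: list[str]):
--     query_terms = query.lower().split()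
--
--     buckets = {}
--     for doc in candidates:
--         text_lower = doc.lower()
--         hit_count = sum(1 for term in query_terms if term in text_lower)
--         buckets.setdefault(hit_count, []).append(doc)
--
--     reranked_docs = []
--     for score in sorted(buckets, reverse=True):
--         reranked_docs += buckets[score]
--     return reranked_docs
-- ===== Notes on version B (the rewrite author's own statement) =====
-- stated objective: alternative
-- what changed: Replaces the comparison sort of (doc, score) pairs by a bucket grouping: a dict maps each score to its docs in input order, and the result concatenates buckets over the distinct scores in descending order, preserving the stable tie order.
import Mathlib
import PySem

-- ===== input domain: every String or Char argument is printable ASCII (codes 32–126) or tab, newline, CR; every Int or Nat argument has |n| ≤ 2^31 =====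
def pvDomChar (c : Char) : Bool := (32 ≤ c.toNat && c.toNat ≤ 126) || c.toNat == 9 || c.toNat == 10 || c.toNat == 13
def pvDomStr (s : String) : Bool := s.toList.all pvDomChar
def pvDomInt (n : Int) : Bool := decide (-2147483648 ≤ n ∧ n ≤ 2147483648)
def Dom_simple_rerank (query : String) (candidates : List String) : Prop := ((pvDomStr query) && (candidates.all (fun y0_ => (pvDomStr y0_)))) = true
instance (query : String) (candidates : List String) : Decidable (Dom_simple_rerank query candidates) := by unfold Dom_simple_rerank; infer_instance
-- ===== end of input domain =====

-- B replaces A's comparison sort of (doc, score) pairs by score buckets (a dict score -> docs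
-- in input order) emitted in descending score order; same return value, alternative algorithm.

-- shared helper: hit_count = sum(1 for term in query_terms if term in text_lower)
-- (this line is identical in A and B)
def pvHits (query_terms : List String) (text_lower : String) : Int :=
  query_terms.foldl (fun acc term => if PySem.Str.isIn term text_lower then acc + 1 else acc) 0

-- ===== PORT A =====
def simple_rerank (query : String) (candidates : List String) : List String :=
  let query_terms := PySem.Str.split₀ (PySem.Str.lower query)
  let scored := candidates.foldl
    (fun acc doc => acc ++ [(doc, pvHits query_terms (PySem.Str.lower doc))])
    ([] : List (String × Int))
  let sorted := PySem.List.sorted scored (fun x => x.2) true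
  sorted.map (fun item => item.1)

-- ===== PORT B =====
def simple_rerank_alt (query : String) (candidates : List String) : List String :=
  let query_terms := PySem.Str.split₀ (PySem.Str.lower query)
  let buckets := candidates.foldl
    (fun b doc =>
      -- buckets.setdefault(hit_count, []).append(doc): the dict afterwards maps hit_count to
      -- its previous bucket (default []) with doc appended, key position preserved — exactly insert/getD
      let hit_count := pvHits query_terms (PySem.Str.lower doc)
      b.insert hit_count (b.getD hit_count [] ++ [doc]))
    (PySem.Dict.empty (κ := Int) (ν := List String))
  -- buckets[score]: score comes from buckets' own keys, so the key is present; getD _ [] is exact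
  (PySem.List.sorted buckets.keys (fun k => k) true).foldl
    (fun out score => out ++ buckets.getD score []) []

-- ===== PRECONDITION & SPEC =====
def Spec_simple_rerank (query : String) (candidates : List String) (out : List String) : Prop := out = simple_rerank_alt query candidates
instance (query : String) (candidates : List String) (out : List String) : Decidable (Spec_simple_rerank query candidates out) := by unfold Spec_simple_rerank; infer_instance

-- ===== CLAIM (what is proved, stated in full; the proofs are below) =====
def Claim_equal_simple_rerank : Prop := ∀ (query : String) (candidates : List String), Dom_simple_rerank query candidates → Spec_simple_rerank query candidates (simple_rerank query candidates)

-- ===== LEMMAS AND PROOFS =====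

-- insertBy places x before the first y with `before x y`; two shape lemmas.
theorem pv_insertBy_all_before {α : Type} (before : α → α → Bool) (x : α) (l : List α)
    (h : ∀ y ∈ l, before x y = true) :
    PySem.List.insertBy before x l = x :: l := by
  cases l with
  | nil => rfl
  | cons y ys => simp [PySem.List.insertBy, h y (by simp)]

theorem pv_insertBy_append {α : Type} (before : α → α → Bool) (x : α) (l1 l2 : List α)
    (h1 : ∀ y ∈ l1, before x y = false) (h2 : ∀ y ∈ l2, before x y = true) :
    PySem.List.insertBy before x (l1 ++ l2) = l1 ++ x :: l2 := by
  induction l1 with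
  | nil => simpa using pv_insertBy_all_before before x l2 h2
  | cons a t ih =>
      have ha : before x a = false := h1 a (by simp)
      simp only [List.cons_append, PySem.List.insertBy, ha, Bool.false_eq_true, if_false]
      rw [ih (fun y hy => h1 y (by simp [hy]))]

-- in a strictly descending list, everything after a skipped prefix can recurse
theorem pv_insertBy_skip {α : Type} (before : α → α → Bool) (x : α) (l1 l2 : List α)
    (h1 : ∀ y ∈ l1, before x y = false) :
    PySem.List.insertBy before x (l1 ++ l2) = l1 ++ PySem.List.insertBy before x l2 := by
  induction l1 with
  | nil => rfl
  | cons a t ih =>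
      have ha : before x a = false := h1 a (by simp)
      cases t <;> cases l2 <;>
        simp_all [PySem.List.insertBy, List.cons_append]

-- sorted … true of a Nodup list is strictly descending
theorem pv_sorted_rev_strict (S : List Int) (hnd : S.Nodup) :
    (PySem.List.sorted S (fun k => k) true).Pairwise (fun a b => b < a) := by
  have h1 : (PySem.List.sorted S (fun k => k) true).Pairwise (fun a b => b ≤ a) :=
    PySem.List.sorted_pairwise_rev S (fun k => k)
  have h2 : (PySem.List.sorted S (fun k => k) true).Nodup :=
    (PySem.List.sorted_perm S (fun k => k) true).nodup_iff.mpr hnd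
  exact (h1.and h2).imp (fun h => lt_of_le_of_ne h.1 (fun e => h.2 e.symm))

-- inserting x whose score is already a key: x lands at the end of its bucket
theorem pv_insert_old (B : Int → List (String × Int)) (x : String × Int) (D : List Int)
    (hstrict : D.Pairwise (fun a b => b < a))
    (hBval : ∀ (j : Int), ∀ p ∈ B j, p.2 = j)
    (hmem : x.2 ∈ D) :
    PySem.List.insertBy (fun a b => decide (b.2 < a.2)) x (List.flatMap B D)
      = List.flatMap (fun j => B j ++ if x.2 = j then [x] else []) D := by
  induction D with
  | nil => cases hmem
  | cons j t ih =>
      rcases List.pairwise_cons.mp hstrict with ⟨hjt, hpt⟩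
      by_cases hxj : x.2 = j
      · have hlt : ∀ y ∈ List.flatMap B t, decide (y.2 < x.2) = true := by
          intro y hy
          obtain ⟨i, hi, hyi⟩ := List.mem_flatMap.mp hy
          have := hBval i y hyi
          have := hjt i hi
          simp; omega
        rw [List.flatMap_cons,
          pv_insertBy_append _ x (B j) (List.flatMap B t)
            (fun y hy => by have := hBval j y hy; simp; omega) hlt,
          List.flatMap_cons, if_pos hxj]
        have ht : List.flatMap B t = List.flatMap (fun j => B j ++ if x.2 = j then [x] else []) t :=
          List.flatMap_congr (fun i hi => by
            have := hjt i hi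
            have hne : x.2 ≠ i := by omega
            simp [hne])
        rw [← ht]
        simp
      · have hxt : x.2 ∈ t := by
          rcases List.mem_cons.mp hmem with h | h
          · exact absurd h hxj
          · exact h
        rw [List.flatMap_cons,
          pv_insertBy_skip _ x (B j) (List.flatMap B t)
            (fun y hy => by
              have := hBval j y hy
              have := hjt x.2 hxt
              simp; omega),
          ih hpt hxt, List.flatMap_cons, if_neg hxj]
        simp

-- inserting x with a brand-new score: the key is inserted and its bucket is [x]
theorem pv_insert_new (B : Int → List (String × Int)) (x : String × Int) (D : List Int)
    (hstrict : D.Pairwise (fun a b => b < a))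
    (hBval : ∀ (j : Int), ∀ p ∈ B j, p.2 = j)
    (hmem : x.2 ∉ D) (hnil : B x.2 = []) :
    PySem.List.insertBy (fun a b => decide (b.2 < a.2)) x (List.flatMap B D)
      = List.flatMap (fun j => B j ++ if x.2 = j then [x] else [])
          (PySem.List.insertBy (fun a b => decide (b < a)) x.2 D) := by
  induction D with
  | nil => simp [PySem.List.insertBy, hnil]
  | cons j t ih =>
      rcases List.pairwise_cons.mp hstrict with ⟨hjt, hpt⟩
      have hxj : x.2 ≠ j := fun h => hmem (h ▸ List.mem_cons_self)
      by_cases hlt : j < x.2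
      · have hall : ∀ y ∈ List.flatMap B (j :: t), decide (y.2 < x.2) = true := by
          intro y hy
          obtain ⟨i, hi, hyi⟩ := List.mem_flatMap.mp hy
          have := hBval i y hyi
          rcases List.mem_cons.mp hi with rfl | h
          · simp; omega
          · have := hjt i h; simp; omega
        rw [pv_insertBy_all_before _ x _ hall]
        have hkey : PySem.List.insertBy (fun a b : Int => decide (b < a)) x.2 (j :: t)
            = x.2 :: j :: t := by
          simp [PySem.List.insertBy, hlt]
        rw [hkey]
        have ht : List.flatMap B (j :: t)
            = List.flatMap (fun i => B i ++ if x.2 = i then [x] else []) (j :: t) :=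
          List.flatMap_congr (fun i hi => by
            rcases List.mem_cons.mp hi with rfl | h
            · simp [hxj]
            · have := hjt i h
              have hne : x.2 ≠ i := by omega
              simp [hne])
        rw [List.flatMap_cons (x := x.2), if_pos rfl, hnil, ← ht]
        simp
      · have hkey : PySem.List.insertBy (fun a b : Int => decide (b < a)) x.2 (j :: t)
            = j :: PySem.List.insertBy (fun a b : Int => decide (b < a)) x.2 t := by
          cases t <;> simp_all [PySem.List.insertBy]
        rw [List.flatMap_cons,
          pv_insertBy_skip _ x (B j) (List.flatMap B t)
            (fun y hy => by have := hBval j y hy; simp; omega),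
          ih hpt (fun h => hmem (List.mem_cons_of_mem j h)),
          hkey, List.flatMap_cons, if_neg hxj]
        simp

-- the bucket characterisation of Python's stable descending sort by an Int key
theorem pv_sort_buckets (xs : List (String × Int)) :
    PySem.List.sorted xs (fun p => p.2) true
      = (PySem.List.sorted (PySem.List.dedup (xs.map (fun p => p.2))) (fun k => k) true).flatMap
          (fun k => xs.filter (fun p => p.2 == k)) := by
  induction xs using List.reverseRecOn with
  | nil => rfl
  | append_singleton xs x ih =>
    have hLHS : PySem.List.sorted (xs ++ [x]) (fun p => p.2) true
        = PySem.List.insertBy (fun a b => decide (b.2 < a.2)) x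
            (PySem.List.sorted xs (fun p => p.2) true) := by
      rw [PySem.List.sorted_rev_eq_foldl_insertBy, PySem.List.sorted_rev_eq_foldl_insertBy,
        List.foldl_append, List.foldl_cons, List.foldl_nil]
    have hS' : PySem.List.dedup ((xs ++ [x]).map (fun p => p.2))
        = PySem.Set.add (PySem.List.dedup (xs.map (fun p => p.2))) x.2 := by
      rw [List.map_append, PySem.List.dedup_eq_ofList, PySem.Set.ofList_eq_foldl,
        List.foldl_append, ← PySem.Set.ofList_eq_foldl, ← PySem.List.dedup_eq_ofList]
      rfl
    have hBnew : ∀ j : Int, (xs ++ [x]).filter (fun p => p.2 == j)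
        = xs.filter (fun p => p.2 == j) ++ (if x.2 = j then [x] else []) := by
      intro j
      rw [List.filter_append]
      congr 1
      by_cases hj : x.2 = j <;> simp [hj]
    have hDstrict : (PySem.List.sorted (PySem.List.dedup (xs.map (fun p => p.2))) (fun k => k) true).Pairwise
        (fun a b => b < a) := pv_sorted_rev_strict _ (PySem.List.nodup_dedup _)
    have hBval : ∀ (j : Int), ∀ p ∈ xs.filter (fun p => p.2 == j), p.2 = j := fun j p hp => by
      have := (List.mem_filter.mp hp).2; simpa using this
    rw [hLHS, ih, hS']
    rw [List.flatMap_congr (l := PySem.List.sorted (PySem.Set.add (PySem.List.dedup (xs.map (fun p => p.2))) x.2) (fun k => k) true)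
      (f := fun k => (xs ++ [x]).filter (fun p => p.2 == k))
      (g := fun j => xs.filter (fun p => p.2 == j) ++ (if x.2 = j then [x] else []))
      (fun j _ => hBnew j)]
    by_cases hmem : x.2 ∈ PySem.List.dedup (xs.map (fun p => p.2))
    · have hadd : PySem.Set.add (PySem.List.dedup (xs.map (fun p => p.2))) x.2
          = PySem.List.dedup (xs.map (fun p => p.2)) := by
        have hc : PySem.Set.contains (PySem.List.dedup (xs.map (fun p => p.2))) x.2 = true :=
          (PySem.Set.contains_iff _ _).mpr hmem
        unfold PySem.Set.add
        rw [hc]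
        simp
      rw [hadd]
      exact pv_insert_old _ x _ hDstrict hBval
        ((PySem.List.mem_sorted _ _ _ _).mpr hmem)
    · have hadd : PySem.Set.add (PySem.List.dedup (xs.map (fun p => p.2))) x.2
          = PySem.List.dedup (xs.map (fun p => p.2)) ++ [x.2] := by
        have hc : PySem.Set.contains (PySem.List.dedup (xs.map (fun p => p.2))) x.2 = false := by
          rw [← Bool.not_eq_true, PySem.Set.contains_iff]
          exact hmem
        unfold PySem.Set.add
        rw [hc]
        simp
      have hD' : PySem.List.sorted (PySem.Set.add (PySem.List.dedup (xs.map (fun p => p.2))) x.2) (fun k => k) true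
          = PySem.List.insertBy (fun a b => decide (b < a)) x.2
              (PySem.List.sorted (PySem.List.dedup (xs.map (fun p => p.2))) (fun k => k) true) := by
        rw [hadd, PySem.List.sorted_rev_eq_foldl_insertBy, List.foldl_append, List.foldl_cons,
          List.foldl_nil, PySem.List.sorted_rev_eq_foldl_insertBy]
      have hnil : xs.filter (fun p => p.2 == x.2) = [] := by
        rw [List.filter_eq_nil_iff]
        intro p hp hpk
        apply hmem
        rw [PySem.List.mem_dedup]
        exact List.mem_map.mpr ⟨p, hp, by simpa using hpk⟩
      rw [hD']
      exact pv_insert_new _ x _ hDstrict hBval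
        (fun h => hmem ((PySem.List.mem_sorted _ _ _ _).mp h)) hnil

-- the dict built by B: keys are the distinct scores in first-occurrence order,
-- each bucket holds the docs of that score in input order
theorem pv_fold_dict (f : String → Int) (cs : List String)
    (d : PySem.Dict Int (List String)) :
    let e := cs.foldl (fun b doc => b.insert (f doc) (b.getD (f doc) [] ++ [doc])) d
    e.keys = (cs.map f).foldl PySem.Set.add d.keys
      ∧ ∀ k, e.getD k [] = d.getD k [] ++ cs.filter (fun doc => f doc == k) := by
  induction cs generalizing d with
  | nil => exact ⟨rfl, fun k => by simp⟩
  | cons a t ih =>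
      obtain ⟨ihk, ihg⟩ := ih (d.insert (f a) (d.getD (f a) [] ++ [a]))
      refine ⟨?_, ?_⟩
      · show (List.foldl _ (d.insert (f a) (d.getD (f a) [] ++ [a])) t).keys = _
        rw [ihk, List.map_cons, List.foldl_cons]
        congr 1
        by_cases hc : d.contains (f a) = true
        · rw [PySem.Dict.keys_insert_of_contains d _ hc]
          simp [PySem.Set.add]
          exact (PySem.Dict.contains_iff_mem_keys d (f a)).mp hc
        · rw [PySem.Dict.keys_insert_of_not_contains d _ (by simp at hc; exact hc)]
          simp [PySem.Set.add]
          intro hm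
          exact hc ((PySem.Dict.contains_iff_mem_keys d (f a)).mpr hm)
      · intro k
        show (List.foldl _ (d.insert (f a) (d.getD (f a) [] ++ [a])) t).getD k [] = _
        rw [ihg k, PySem.Dict.getD_insert, List.filter_cons]
        by_cases hk : k = f a
        · simp [hk]
        · have : (f a == k) = false := by simp [Ne.symm hk]
          simp [hk, this]

-- foldl-append over candidates builds the map
theorem pv_scored_eq_map (f : String → Int) (cs : List String) :
    cs.foldl (fun acc doc => acc ++ [(doc, f doc)]) ([] : List (String × Int))
      = cs.map (fun doc => (doc, f doc)) := by
  rw [PySem.List.foldl_append_eq_flatMap]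
  induction cs with
  | nil => rfl
  | cons a t ih => simp [List.flatMap_cons] at ih ⊢; exact ih

-- ===== VERDICT (by name: the statement is the Claim_ definition above) =====
theorem simple_rerank_spec : Claim_equal_simple_rerank := by
  intro query candidates _
  unfold Spec_simple_rerank simple_rerank simple_rerank_alt
  dsimp only
  set terms := PySem.Str.split₀ (PySem.Str.lower query) with hterms
  set f : String → Int := fun doc => pvHits terms (PySem.Str.lower doc) with hf
  obtain ⟨hkeys, hget⟩ := pv_fold_dict f candidates PySem.Dict.empty
  rw [pv_scored_eq_map f candidates, pv_sort_buckets]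
  rw [PySem.List.foldl_append_eq_flatMap]
  simp only [List.nil_append]
  rw [hkeys]
  have hdedup : (candidates.map f).foldl PySem.Set.add (PySem.Dict.empty (κ := Int) (ν := List String)).keys
      = PySem.List.dedup ((candidates.map (fun doc => (doc, f doc))).map (fun p => p.2)) := by
    simp [PySem.List.dedup_eq_ofList, PySem.Set.ofList_eq_foldl, PySem.Dict.keys_empty, List.map_map]
    rfl
  rw [← hdedup]
  rw [List.map_flatMap]
  have hfun : (fun k => List.map (fun p => p.1)
        ((candidates.map (fun doc => (doc, f doc))).filter (fun p => p.2 == k)))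
      = (fun k => (List.foldl (fun b doc => b.insert (f doc) (b.getD (f doc) [] ++ [doc]))
          PySem.Dict.empty candidates).getD k []) := by
    funext k
    rw [hget k]
    simp [PySem.Dict.getD_empty, List.filter_map, Function.comp_def]
  rw [hfun]
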